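-- pv_equiv track=rewrite | github.com/DouglasKlafkeScheibler/Decomp_Servidor | decomp-entrada-Servidor/decompdeck.py | findRanges
-- ===== SOURCE A (Python) =====
-- def findRanges(allContent, length, offset):
--     ranges = {}
--     for i in range(1, 1+length):
--         start = allContent.find('BLOCO {}'.format(i))
--         end = allContent.find('BLOCO {}'.format(i+1))
--
--         if end == -1:
--             end = len(allContent)
--         ranges[offset + i] = [start, end]
--
--     if 20 in ranges and ranges[20][0] == -1:
--         ranges[20][0] = allContent.find('REGISTRO FD')+11
--
--     if 32 in ranges and ranges[32][0] == -1:
--         ranges[32][0] = allContent.find('TAXA DE IRRIGACAO')+17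
--
--     return ranges
-- ===== SOURCE B (Python) =====
-- def findRanges(allContent, length, offset):
--     # One left-to-right scan over the text: at each occurrence of 'BLOCO ' record the
--     # first position of every section number readable there, then assemble the ranges.
--     n = len(allContent)
--     limit = length + 1
--     occ = {}
--     pos = allContent.find('BLOCO ')
--     while pos != -1:
--         k = 0
--         j = pos + 6
--         while j < n and allContent[j].isdigit():
--             ch = allContent[j]
--             if k == 0 and ch == '0':
--                 break
--             k = 10 * k + (ord(ch) - 48)
--             if k > limit:
--                 break
--             if k not in occ:
--                 occ[k] = pos
--             j += 1
--         pos = allContent.find('BLOCO ', pos + 1)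
--
--     ranges = {offset + i: [occ.get(i, -1), occ.get(i + 1, n)]
--               for i in range(1, 1 + length)}
--
--     if 20 in ranges and ranges[20][0] == -1:
--         ranges[20][0] = allContent.find('REGISTRO FD') + 11
--
--     if 32 in ranges and ranges[32][0] == -1:
--         ranges[32][0] = allContent.find('TAXA DE IRRIGACAO') + 17
--
--     return ranges
-- ===== Notes on version B (the rewrite author's own statement) =====
-- stated objective: faster
-- what changed: A runs one substring search over the whole text for every section number (2 finds per i in range(1, length+1)); B makes a single left-to-right scan over the text, recording at each occurrence of 'BLOCO ' the first position of every section number readable there, then assembles all ranges by dictionary lookups.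
import Mathlib
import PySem

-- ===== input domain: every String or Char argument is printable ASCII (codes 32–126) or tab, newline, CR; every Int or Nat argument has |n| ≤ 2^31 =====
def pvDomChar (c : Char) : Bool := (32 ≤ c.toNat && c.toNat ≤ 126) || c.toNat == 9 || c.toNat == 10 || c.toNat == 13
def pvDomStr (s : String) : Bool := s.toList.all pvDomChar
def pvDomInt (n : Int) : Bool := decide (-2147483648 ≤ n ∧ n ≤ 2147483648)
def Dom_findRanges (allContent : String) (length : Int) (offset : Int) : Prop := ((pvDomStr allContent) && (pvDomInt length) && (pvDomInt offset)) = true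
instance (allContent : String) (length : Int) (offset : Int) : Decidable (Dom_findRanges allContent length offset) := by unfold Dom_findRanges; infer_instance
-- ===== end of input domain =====

-- B replaces A's per-section substring searches by ONE left-to-right scan of the text that
-- records the first occurrence of every 'BLOCO k'; same return value, different algorithm.

-- ===== PORT A =====
-- 'BLOCO {}'.format(i) = "BLOCO " + str(i)  (exact for a single int argument)
def pvFmt (i : Int) : String := String.ofList ("BLOCO ".toList ++ PySem.Int.toChars i)

def findRanges (allContent : String) (length : Int) (offset : Int) : List (Int × List Int) :=
  let ranges : PySem.Dict Int (List Int) :=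
    (PySem.List.pyRange 1 (1 + length)).foldl (fun r i =>
      let start := PySem.Str.find allContent (pvFmt i)
      let e0 := PySem.Str.find allContent (pvFmt (i + 1))
      let e := if e0 = -1 then PySem.Str.len allContent else e0
      r.insert (offset + i) [start, e]) PySem.Dict.empty
  -- ranges[20][0] read / write: every stored list has length 2, so pyGetD / pySetD at 0 are exact
  let ranges :=
    if ranges.contains 20 && (PySem.List.pyGetD (ranges.getD 20 []) 0 0 == (-1 : Int)) then
      ranges.modify 20 [] (fun l => PySem.List.pySetD l 0 (PySem.Str.find allContent "REGISTRO FD" + 11))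
    else ranges
  let ranges :=
    if ranges.contains 32 && (PySem.List.pyGetD (ranges.getD 32 []) 0 0 == (-1 : Int)) then
      ranges.modify 32 [] (fun l => PySem.List.pySetD l 0 (PySem.Str.find allContent "TAXA DE IRRIGACAO" + 17))
    else ranges
  ranges.items

-- ===== PORT B =====
-- inner 'while j < n and allContent[j].isdigit():' loop of Source B, as structural recursion over
-- the remaining characters allContent[j:] (reading allContent[j] then j += 1 peels one char; exact)
def pvScanDigits : List Char → Int → Int → Int → PySem.Dict Int Int → PySem.Dict Int Int
  | [], _, _, _, occ => occ
  | ch :: rest, k, limit, pos, occ =>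
    if PySem.Chars.isdigit ch then
      if k == 0 && ch == '0' then occ
      else
        let k' := 10 * k + ((ch.toNat : Int) - 48)   -- ord(ch) - 48
        if limit < k' then occ
        else
          let occ' := if occ.contains k' then occ else occ.insert k' pos
          pvScanDigits rest k' limit pos occ'
    else occ

-- termination bound for the outer while loop (cited by pvScanOccs's decreasing_by)
lemma pvFindFrom_bounds (s sub : List Char) (c : Nat) (hsub : sub ≠ [])
    (h : PySem.Chars.findFrom s sub (c : Int) none ≠ -1) :
    c ≤ (PySem.Chars.findFrom s sub (c : Int) none).toNat ∧
      (PySem.Chars.findFrom s sub (c : Int) none).toNat < s.length := by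
  have hc : c ≤ s.length := by
    by_contra hgt
    apply h
    simp only [PySem.Chars.findFrom]
    have h0 : ¬ ((c : Int) < 0) := by omega
    have h1 : (s.length : Int) < (c : Int) := by omega
    simp only [h0, if_false]
    rw [if_pos h1]
  obtain ⟨h1, h2, _⟩ := PySem.Chars.findFrom_natCast_spec s sub c hc h
  refine ⟨by omega, ?_⟩
  rcases h2 with ⟨t, ht⟩
  have hne : (List.drop (PySem.Chars.findFrom s sub (c : Int) none).toNat s) ≠ [] := by
    rw [← ht]; exact fun hnil => hsub (List.append_eq_nil_iff.mp hnil).1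
  by_contra hge
  exact hne (List.drop_eq_nil_of_le (by omega))

-- outer loop of Source B: pos = allContent.find('BLOCO '); while pos != -1: …; pos = find('BLOCO ', pos+1)
def pvScanOccs (s : List Char) (limit : Int) (c : Nat) (occ : PySem.Dict Int Int) :
    PySem.Dict Int Int :=
  if h : PySem.Chars.findFrom s "BLOCO ".toList (c : Int) none = -1 then occ
  else
    let pos := PySem.Chars.findFrom s "BLOCO ".toList (c : Int) none
    pvScanOccs s limit (pos.toNat + 1) (pvScanDigits (s.drop (pos.toNat + 6)) 0 limit pos occ)
termination_by s.length - c
decreasing_by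
  have := pvFindFrom_bounds s "BLOCO ".toList c (by decide) h
  omega

def findRanges_alt (allContent : String) (length : Int) (offset : Int) : List (Int × List Int) :=
  let n := PySem.Str.len allContent
  let limit := length + 1
  let occ := pvScanOccs allContent.toList limit 0 PySem.Dict.empty
  let ranges : PySem.Dict Int (List Int) :=
    (PySem.List.pyRange 1 (1 + length)).foldl (fun r i =>
      r.insert (offset + i) [occ.getD i (-1), occ.getD (i + 1) n]) PySem.Dict.empty
  -- same tail as Source A's (identical source lines in Source B)
  let ranges :=
    if ranges.contains 20 && (PySem.List.pyGetD (ranges.getD 20 []) 0 0 == (-1 : Int)) then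
      ranges.modify 20 [] (fun l => PySem.List.pySetD l 0 (PySem.Str.find allContent "REGISTRO FD" + 11))
    else ranges
  let ranges :=
    if ranges.contains 32 && (PySem.List.pyGetD (ranges.getD 32 []) 0 0 == (-1 : Int)) then
      ranges.modify 32 [] (fun l => PySem.List.pySetD l 0 (PySem.Str.find allContent "TAXA DE IRRIGACAO" + 17))
    else ranges
  ranges.items

-- ===== PRECONDITION & SPEC =====
def Spec_findRanges (allContent : String) (length : Int) (offset : Int) (out : List (Int × List Int)) : Prop := out = findRanges_alt allContent length offset
instance (allContent : String) (length : Int) (offset : Int) (out : List (Int × List Int)) : Decidable (Spec_findRanges allContent length offset out) := by unfold Spec_findRanges; infer_instance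

-- ===== CLAIM (what is proved, stated in full; the proofs are below) =====
def Claim_equal_findRanges : Prop := ∀ (allContent : String) (length : Int) (offset : Int), Dom_findRanges allContent length offset → Spec_findRanges allContent length offset (findRanges allContent length offset)

-- ===== LEMMAS AND PROOFS =====


-- ---- decimal representation (Nat.toDigits 10) ----
def pvRep (k : Nat) : List Char := Nat.toDigits 10 k

lemma pvTDC_acc (f : Nat) : ∀ (n : Nat) (acc : List Char),
    Nat.toDigitsCore 10 f n acc = Nat.toDigitsCore 10 f n [] ++ acc := by
  induction f with
  | zero => intro n acc; simp [Nat.toDigitsCore]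
  | succ f ih =>
    intro n acc
    simp only [Nat.toDigitsCore]
    by_cases h : n / 10 = 0
    · simp [h]
    · simp only [h, if_false]
      rw [ih (n / 10) (Nat.digitChar (n % 10) :: acc), ih (n / 10) [Nat.digitChar (n % 10)]]
      simp

lemma pvTDC_fuel (f1 : Nat) : ∀ (n f2 : Nat), n < f1 → n < f2 →
    Nat.toDigitsCore 10 f1 n [] = Nat.toDigitsCore 10 f2 n [] := by
  induction f1 with
  | zero => intro n f2 h1 h2; omega
  | succ f1 ih =>
    intro n f2 h1 h2
    cases f2 with
    | zero => omega
    | succ f2 =>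
      simp only [Nat.toDigitsCore]
      by_cases h : n / 10 = 0
      · simp [h]
      · simp only [h, if_false]
        have hn : 0 < n := by
          rcases Nat.eq_zero_or_pos n with h0 | h0
          · exact absurd (by simp [h0]) h
          · exact h0
        have hlt : n / 10 < n := Nat.div_lt_self hn (by norm_num)
        rw [pvTDC_acc, pvTDC_acc f2, ih (n / 10) f2 (by omega) (by omega)]

lemma pvRep_lt {k : Nat} (h : k < 10) : pvRep k = [Nat.digitChar k] := by
  simp [pvRep, Nat.toDigits, Nat.toDigitsCore, Nat.div_eq_of_lt h, Nat.mod_eq_of_lt h]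

lemma pvRep_ge {k : Nat} (h : 10 ≤ k) :
    pvRep k = pvRep (k / 10) ++ [Nat.digitChar (k % 10)] := by
  have h1 : 1 ≤ k / 10 := (Nat.one_le_div_iff (by norm_num)).mpr h
  have h0 : k / 10 ≠ 0 := by omega
  have hlt : k / 10 < k := Nat.div_lt_self (by omega) (by norm_num)
  have e1 : pvRep k = Nat.toDigitsCore 10 k (k / 10) [(k % 10).digitChar] := by
    simp [pvRep, Nat.toDigits, Nat.toDigitsCore, h0]
  rw [e1, pvTDC_acc, pvTDC_fuel k (k / 10) (k / 10 + 1) hlt (by omega)]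
  rfl

lemma pvRep_step {k d : Nat} (hk : 1 ≤ k) (hd : d < 10) :
    pvRep (10 * k + d) = pvRep k ++ [Nat.digitChar d] := by
  have h10 : 10 ≤ 10 * k + d := by omega
  rw [pvRep_ge h10]
  have hdiv : (10 * k + d) / 10 = k := by
    rw [Nat.mul_add_div (by norm_num)]
    omega
  have hmod : (10 * k + d) % 10 = d := by
    rw [Nat.mul_add_mod]
    omega
  rw [hdiv, hmod]

lemma pvRep_ne_nil (k : Nat) : pvRep k ≠ [] := by
  by_cases h : k < 10
  · rw [pvRep_lt h]; simp
  · rw [pvRep_ge (by omega)]; simp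

lemma pvDigitChar_toNat {d : Nat} (h : d < 10) : (Nat.digitChar d).toNat = 48 + d := by
  interval_cases d <;> decide

lemma pvIsdigit_digitChar {d : Nat} (h : d < 10) :
    PySem.Chars.isdigit (Nat.digitChar d) = true := by
  interval_cases d <;> decide

lemma pvRep_digits (k : Nat) : ∀ c ∈ pvRep k, PySem.Chars.isdigit c = true := by
  induction k using Nat.strong_induction_on with
  | _ k ih =>
    by_cases h : k < 10
    · rw [pvRep_lt h]
      intro c hc
      simp only [List.mem_singleton] at hc
      subst hc
      exact pvIsdigit_digitChar h
    · rw [pvRep_ge (by omega)]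
      intro c hc
      rcases List.mem_append.mp hc with hl | hr
      · exact ih (k / 10) (Nat.div_lt_self (by omega) (by norm_num)) c hl
      · simp only [List.mem_singleton] at hr
        subst hr
        exact pvIsdigit_digitChar (Nat.mod_lt _ (by norm_num))

lemma pvRep_head (k : Nat) : 1 ≤ k → ∀ c cs, pvRep k = c :: cs → c ≠ '0' := by
  induction k using Nat.strong_induction_on with
  | _ k ih =>
    intro hk c cs hrep
    by_cases h : k < 10
    · rw [pvRep_lt h] at hrep
      obtain ⟨hc, -⟩ := List.cons.inj hrep
      subst hc
      interval_cases k <;> decide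
    · rw [pvRep_ge (by omega)] at hrep
      rcases List.exists_cons_of_ne_nil (pvRep_ne_nil (k / 10)) with ⟨c0, t, ht⟩
      rw [ht] at hrep
      simp only [List.cons_append] at hrep
      obtain ⟨hc, -⟩ := List.cons.inj hrep
      rw [← hc]
      exact ih (k / 10) (Nat.div_lt_self (by omega) (by norm_num))
        ((Nat.one_le_div_iff (by norm_num)).mpr (by omega)) c0 t ht

def pvVal (cs : List Char) : Nat := cs.foldl (fun a c => 10 * a + (c.toNat - 48)) 0

lemma pvVal_go (v : List Char) : ∀ a : Nat,
    v.foldl (fun a c => 10 * a + (c.toNat - 48)) a = a * 10 ^ v.length + pvVal v := by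
  induction v with
  | nil => intro a; simp [pvVal]
  | cons c v ih =>
    intro a
    simp only [List.foldl_cons, List.length_cons, pvVal]
    rw [ih (10 * a + (c.toNat - 48)), ih (10 * 0 + (c.toNat - 48))]
    ring

lemma pvVal_append (u v : List Char) :
    pvVal (u ++ v) = pvVal u * 10 ^ v.length + pvVal v := by
  simp only [pvVal, List.foldl_append]
  rw [pvVal_go]
  rfl

lemma pvVal_rep (k : Nat) : pvVal (pvRep k) = k := by
  induction k using Nat.strong_induction_on with
  | _ k ih =>
    by_cases h : k < 10
    · rw [pvRep_lt h]
      simp [pvVal, pvDigitChar_toNat h]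
    · rw [pvRep_ge (by omega), pvVal_append]
      rw [ih (k / 10) (Nat.div_lt_self (by omega) (by norm_num))]
      have hm : (k % 10) < 10 := Nat.mod_lt _ (by norm_num)
      simp [pvVal, pvDigitChar_toNat hm]
      omega

lemma pvRep_inj {a b : Nat} (h : pvRep a = pvRep b) : a = b := by
  have := pvVal_rep a
  rw [h, pvVal_rep] at this
  omega

lemma pvRep_prefix_le {a b : Nat} (h : pvRep a <+: pvRep b) : a ≤ b := by
  rcases h with ⟨t, ht⟩
  have hb := pvVal_rep b
  rw [← ht, pvVal_append, pvVal_rep] at hb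
  have h1 : a ≤ a * 10 ^ t.length := Nat.le_mul_of_pos_right a (pow_pos (by norm_num : (0:ℕ) < 10) _)
  omega

lemma pvChar_digit {c : Char} (h : PySem.Chars.isdigit c = true) :
    48 ≤ c.toNat ∧ c.toNat ≤ 57 := by
  simp only [PySem.Chars.isdigit, Bool.and_eq_true, decide_eq_true_eq] at h
  obtain ⟨h1, h2⟩ := h
  constructor
  · exact h1
  · exact h2

lemma pvDigitChar_eq {c : Char} (h : PySem.Chars.isdigit c = true) :
    Nat.digitChar (c.toNat - 48) = c := by
  obtain ⟨h1, h2⟩ := pvChar_digit h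
  have hd : c.toNat - 48 < 10 := by omega
  apply Char.ext
  apply UInt32.toNat_inj.mp
  have := pvDigitChar_toNat hd
  show (Nat.digitChar (c.toNat - 48)).toNat = c.toNat
  omega

-- ---- patterns and hits ----
def pvPatt (m : Nat) : List Char := "BLOCO ".toList ++ pvRep m

lemma pvFmt_toList {i : Int} (h : 0 ≤ i) : (pvFmt i).toList = pvPatt i.toNat := by
  simp only [pvFmt, String.toList_ofList, pvPatt, pvRep, PySem.Int.toChars]
  rw [if_neg (by omega)]

def pvHit (s : List Char) (p : Nat) (m : Nat) : Bool := decide (pvPatt m <+: s.drop p)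

lemma pvHit_iff {s : List Char} {p : Nat} (h : "BLOCO ".toList <+: s.drop p) (m : Nat) :
    pvHit s p m = true ↔ pvRep m <+: s.drop (p + 6) := by
  rcases h with ⟨t, ht⟩
  have hdrop : s.drop (p + 6) = t := by
    rw [← List.drop_drop, ← ht,
      show (6 : Nat) = ("BLOCO ".toList).length from by decide]
    exact List.drop_left
  rw [hdrop]
  simp only [pvHit, decide_eq_true_eq, pvPatt]
  rw [← ht]
  exact List.prefix_append_right_inj _

lemma pvNoHit {s : List Char} {p : Nat} (h : ¬ "BLOCO ".toList <+: s.drop p) (m : Nat) :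
    pvHit s p m = false := by
  simp only [pvHit, decide_eq_false_iff_not]
  intro hpre
  exact h (List.IsPrefix.trans (List.prefix_append _ _) hpre)

-- ---- the inner digit scan ----
def pvReachP (k0 m : Nat) (ds : List Char) : Prop :=
  ∃ u, u ≠ [] ∧ u <+: ds ∧ pvRep m = pvRep k0 ++ u

def pvReach (k0 m : Nat) (ds : List Char) : Bool :=
  decide (pvRep k0 <+: pvRep m) && decide ((pvRep m).drop (pvRep k0).length ≠ []) &&
    decide ((pvRep m).drop (pvRep k0).length <+: ds)

lemma pvReach_iff (k0 m : Nat) (ds : List Char) :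
    pvReach k0 m ds = true ↔ pvReachP k0 m ds := by
  simp only [pvReach, Bool.and_eq_true, decide_eq_true_eq]
  constructor
  · rintro ⟨⟨⟨t, ht⟩, hne⟩, hpre⟩
    refine ⟨(pvRep m).drop (pvRep k0).length, hne, hpre, ?_⟩
    rw [← ht, List.drop_left]
  · rintro ⟨u, hu, hpre, hrep⟩
    rw [hrep, List.drop_left]
    exact ⟨⟨⟨u, rfl⟩, hu⟩, hpre⟩

lemma pvReach_lt {k0 m : Nat} {ds : List Char} (h : pvReachP k0 m ds) : k0 < m := by
  rcases h with ⟨u, hu, -, hrep⟩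
  have hle : k0 ≤ m := pvRep_prefix_le ⟨u, hrep.symm⟩
  by_contra hlt
  have hk : k0 = m := by omega
  subst hk
  have hlen := congrArg List.length hrep
  rw [List.length_append] at hlen
  have h0 : u.length = 0 := by omega
  exact hu (List.length_eq_zero_iff.mp h0)

lemma pvReach_not_digit {k0 m : Nat} {ch : Char} {rest : List Char}
    (hch : PySem.Chars.isdigit ch = false) : ¬ pvReachP k0 m (ch :: rest) := by
  rintro ⟨u, hu, hpre, hrep⟩
  rcases List.exists_cons_of_ne_nil hu with ⟨c1, u', rfl⟩
  have hc1 : c1 = ch := by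
    rcases hpre with ⟨t', ht'⟩
    exact (List.cons.inj ht'.symm).1.symm
  subst hc1
  have : PySem.Chars.isdigit c1 = true :=
    pvRep_digits m c1 (by rw [hrep]; simp)
  rw [hch] at this
  exact absurd this (by simp)

lemma pvReach_cons {k0 m : Nat} {ch : Char} {rest : List Char} (hk0 : 1 ≤ k0)
    (hch : PySem.Chars.isdigit ch = true) :
    pvReachP k0 m (ch :: rest) ↔
      (m = 10 * k0 + (ch.toNat - 48) ∨ pvReachP (10 * k0 + (ch.toNat - 48)) m rest) := by
  have hd : ch.toNat - 48 < 10 := by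
    have := pvChar_digit hch
    omega
  have hstep : pvRep (10 * k0 + (ch.toNat - 48)) = pvRep k0 ++ [ch] := by
    rw [pvRep_step hk0 hd, pvDigitChar_eq hch]
  constructor
  · rintro ⟨u, hu, hpre, hrep⟩
    rcases List.exists_cons_of_ne_nil hu with ⟨c1, u', rfl⟩
    have hc1 : c1 = ch := by
      rcases hpre with ⟨t', ht'⟩
      exact (List.cons.inj ht'.symm).1.symm
    subst hc1
    rcases u' with _ | ⟨c2, u''⟩
    · left
      apply pvRep_inj
      rw [hrep, hstep]
    · right
      refine ⟨c2 :: u'', by simp, ?_, ?_⟩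
      · rcases hpre with ⟨t', ht'⟩
        exact ⟨t', (List.cons.inj ht').2⟩
      · rw [hrep, hstep]
        simp
  · rintro (rfl | ⟨u, hu, hpre, hrep⟩)
    · exact ⟨[ch], by simp, ⟨rest, rfl⟩, hstep⟩
    · refine ⟨ch :: u, by simp, ?_, ?_⟩
      · rcases hpre with ⟨t', ht'⟩
        exact ⟨t', by rw [List.cons_append, ht']⟩
      · rw [hrep, hstep]
        simp

lemma pvRep_prefix_cons {m : Nat} (hm : 1 ≤ m) {ch : Char} {rest : List Char}
    (hch : PySem.Chars.isdigit ch = true) (hch0 : ch ≠ '0') :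
    pvRep m <+: (ch :: rest) ↔
      (m = ch.toNat - 48 ∨ pvReachP (ch.toNat - 48) m rest) := by
  have hd1 : 1 ≤ ch.toNat - 48 := by
    have h48 := pvChar_digit hch
    have : ch.toNat ≠ 48 := by
      intro hc
      apply hch0
      have := pvDigitChar_eq hch
      rw [hc] at this
      simpa using this.symm
    omega
  have hd : ch.toNat - 48 < 10 := by
    have := pvChar_digit hch
    omega
  have hsing : pvRep (ch.toNat - 48) = [ch] := by
    rw [pvRep_lt hd, pvDigitChar_eq hch]
  constructor
  · intro hpre
    rcases List.exists_cons_of_ne_nil (pvRep_ne_nil m) with ⟨c1, u, hu⟩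
    have hc1 : c1 = ch := by
      rcases hpre with ⟨t', ht'⟩
      rw [hu] at ht'
      exact (List.cons.inj ht'.symm).1.symm
    subst hc1
    rcases u with _ | ⟨c2, u'⟩
    · left
      apply pvRep_inj
      rw [hu, hsing]
    · right
      refine ⟨c2 :: u', by simp, ?_, ?_⟩
      · rcases hpre with ⟨t', ht'⟩
        rw [hu] at ht'
        exact ⟨t', (List.cons.inj ht').2⟩
      · rw [hu, hsing]
        simp
  · rintro (rfl | ⟨u, hu, hpre, hrep⟩)
    · rw [hsing]
      exact ⟨rest, rfl⟩
    · rw [hrep, hsing]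
      rcases hpre with ⟨t', ht'⟩
      exact ⟨t', by rw [List.append_assoc, ht']; simp⟩

lemma pvReach_false_of_not {k0 m : Nat} {ds : List Char} (h : ¬ pvReachP k0 m ds) :
    pvReach k0 m ds = false := by
  rw [← Bool.not_eq_true, pvReach_iff]
  exact h

lemma pvScanDigits_get (ds : List Char) : ∀ (k0 : Nat), 1 ≤ k0 →
    ∀ (limit pos : Int) (occ : PySem.Dict Int Int) (j : Int), 1 ≤ j → j ≤ limit →
    (pvScanDigits ds (k0 : Int) limit pos occ).get? j =
      if pvReach k0 j.toNat ds = true ∧ occ.contains j = false then some pos else occ.get? j := by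
  induction ds with
  | nil =>
    intro k0 hk0 limit pos occ j hj1 hj2
    rw [if_neg]
    · rfl
    · rintro ⟨hr, -⟩
      rcases (pvReach_iff _ _ _).mp hr with ⟨u, hu, hpre, -⟩
      exact hu (List.prefix_nil.mp hpre)
  | cons ch rest ih =>
    intro k0 hk0 limit pos occ j hj1 hj2
    have hjm : ((j.toNat : Int)) = j := Int.toNat_of_nonneg (by omega)
    by_cases hch : PySem.Chars.isdigit ch = true
    · have hkne : (((k0 : Int) == 0) && (ch == '0')) = false := by
        have h0 : ((k0 : Int) == 0) = false := by
          simp only [beq_eq_false_iff_ne, ne_eq]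
          omega
        simp [h0]
      have hd48 := pvChar_digit hch
      have hd : ch.toNat - 48 < 10 := by omega
      have hcast : 10 * (k0 : Int) + ((ch.toNat : Int) - 48)
          = ((10 * k0 + (ch.toNat - 48) : Nat) : Int) := by push_cast; omega
      set K : Nat := 10 * k0 + (ch.toNat - 48) with hK
      simp only [pvScanDigits, hch, if_true, hkne, Bool.false_eq_true, if_false, hcast]
      by_cases hlim : limit < (K : Int)
      · rw [if_pos hlim, if_neg]
        rintro ⟨hr, -⟩
        rcases (pvReach_cons hk0 hch).mp ((pvReach_iff _ _ _).mp hr) with hjK | htail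
        · rw [← hK] at hjK; omega
        · rw [← hK] at htail
          have := pvReach_lt htail
          omega
      · rw [if_neg hlim]
        rw [ih K (by omega) limit pos _ j hj1 hj2]
        by_cases hjK : j = (K : Int)
        · have hmK : j.toNat = K := by omega
          have hKfalse : pvReach K j.toNat rest = false := by
            apply pvReach_false_of_not
            intro hP
            have := pvReach_lt hP
            omega
          have hcondR : pvReach k0 j.toNat (ch :: rest) = true :=
            (pvReach_iff _ _ _).mpr ((pvReach_cons hk0 hch).mpr (Or.inl (by rw [← hK]; omega)))
          rw [hKfalse]
          simp only [Bool.false_eq_true, false_and, if_false, hcondR, true_and]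
          by_cases hc : occ.contains j = true
          · rw [if_pos (show occ.contains ((K : Nat) : Int) = true from by
                rw [← hjK]; exact hc),
              if_neg (by simp [hc])]
          · have hc' : occ.contains j = false := by simp at hc; exact hc
            rw [if_neg (show ¬ occ.contains ((K : Nat) : Int) = true from by
                rw [← hjK]; simp [hc']),
              if_pos hc', hjK, PySem.Dict.get?_insert_self]
        · have hmK : j.toNat ≠ K := by omega
          have hocc' : (if occ.contains (K : Int) then occ
              else occ.insert (K : Int) pos).contains j = occ.contains j := by
            by_cases hc : occ.contains (K : Int) = true
            · rw [if_pos hc]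
            · rw [if_neg (by simp [hc]), PySem.Dict.contains_insert]
              simp [hjK]
          have hocc'' : (if occ.contains (K : Int) then occ
              else occ.insert (K : Int) pos).get? j = occ.get? j := by
            by_cases hc : occ.contains (K : Int) = true
            · rw [if_pos hc]
            · rw [if_neg (by simp [hc]), PySem.Dict.get?_insert]
              simp [hjK]
          have hiff : pvReach K j.toNat rest = pvReach k0 j.toNat (ch :: rest) := by
            by_cases hP : pvReachP K j.toNat rest
            · rw [(pvReach_iff _ _ _).mpr hP,
                (pvReach_iff _ _ _).mpr ((pvReach_cons hk0 hch).mpr (Or.inr (hK ▸ hP)))]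
            · rw [pvReach_false_of_not hP, pvReach_false_of_not]
              intro hQ
              rcases (pvReach_cons hk0 hch).mp hQ with h1 | h2
              · rw [← hK] at h1; omega
              · rw [← hK] at h2; exact hP h2
          rw [hocc', hocc'', hiff]
    · have hch' : PySem.Chars.isdigit ch = false := by simp at hch; exact hch
      simp only [pvScanDigits, hch', Bool.false_eq_true, if_false]
      rw [if_neg]
      rintro ⟨hr, -⟩
      exact pvReach_not_digit hch' ((pvReach_iff _ _ _).mp hr)

lemma pvScanDigits_zero_get (ds : List Char) (limit pos : Int) (occ : PySem.Dict Int Int)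
    (j : Int) (hj1 : 1 ≤ j) (hj2 : j ≤ limit) :
    (pvScanDigits ds 0 limit pos occ).get? j =
      if pvRep j.toNat <+: ds ∧ occ.contains j = false then some pos else occ.get? j := by
  have hjm : ((j.toNat : Int)) = j := Int.toNat_of_nonneg (by omega)
  have hj1' : 1 ≤ j.toNat := by omega
  cases ds with
  | nil =>
    rw [if_neg]
    · rfl
    · rintro ⟨hr, -⟩
      exact pvRep_ne_nil j.toNat (List.prefix_nil.mp hr)
  | cons ch rest =>
    by_cases hch : PySem.Chars.isdigit ch = true
    · by_cases hch0 : ch = '0'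
      · subst hch0
        simp only [pvScanDigits, hch, if_true]
        rw [if_pos (by decide), if_neg]
        rintro ⟨hr, -⟩
        rcases List.exists_cons_of_ne_nil (pvRep_ne_nil j.toNat) with ⟨c1, u, hu⟩
        have hc1 : c1 = '0' := by
          rcases hr with ⟨t', ht'⟩
          rw [hu] at ht'
          exact (List.cons.inj ht').1
        exact pvRep_head j.toNat hj1' c1 u hu hc1
      · have hd1 : 1 ≤ ch.toNat - 48 := by
          have h48 := pvChar_digit hch
          have : ch.toNat ≠ 48 := by
            intro hc
            apply hch0
            have := pvDigitChar_eq hch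
            rw [hc] at this
            simpa using this.symm
          omega
        have hd : ch.toNat - 48 < 10 := by
          have := pvChar_digit hch
          omega
        have hkne : (((0 : Int) == 0) && (ch == '0')) = false := by
          have : (ch == '0') = false := by simp [hch0]
          simp [this]
        have hcast : 10 * (0 : Int) + ((ch.toNat : Int) - 48)
            = ((ch.toNat - 48 : Nat) : Int) := by
          have := pvChar_digit hch
          push_cast
          omega
        set K : Nat := ch.toNat - 48 with hK
        simp only [pvScanDigits, hch, if_true, hkne, Bool.false_eq_true, if_false, hcast]
        by_cases hlim : limit < (K : Int)
        · rw [if_pos hlim, if_neg]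
          rintro ⟨hr, -⟩
          rcases (pvRep_prefix_cons hj1' hch hch0).mp hr with hjK | htail
          · rw [← hK] at hjK; omega
          · rw [← hK] at htail
            have := pvReach_lt htail
            omega
        · rw [if_neg hlim]
          rw [pvScanDigits_get rest K (by omega) limit pos _ j hj1 hj2]
          by_cases hjK : j = (K : Int)
          · have hmK : j.toNat = K := by omega
            have hKfalse : pvReach K j.toNat rest = false := by
              apply pvReach_false_of_not
              intro hP
              have := pvReach_lt hP
              omega
            have hcondR : pvRep j.toNat <+: (ch :: rest) :=
              (pvRep_prefix_cons hj1' hch hch0).mpr (Or.inl (by rw [← hK]; omega))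
            rw [hKfalse]
            simp only [Bool.false_eq_true, false_and, if_false]
            by_cases hc : occ.contains j = true
            · rw [if_pos (show occ.contains ((K : Nat) : Int) = true from by
                  rw [← hjK]; exact hc),
                if_neg (by simp [hc])]
            · have hc' : occ.contains j = false := by simp at hc; exact hc
              rw [if_neg (show ¬ occ.contains ((K : Nat) : Int) = true from by
                  rw [← hjK]; simp [hc']),
                if_pos ⟨hcondR, hc'⟩, hjK, PySem.Dict.get?_insert_self]
          · have hmK : j.toNat ≠ K := by omega
            have hocc' : (if occ.contains (K : Int) then occ
                else occ.insert (K : Int) pos).contains j = occ.contains j := by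
              by_cases hc : occ.contains (K : Int) = true
              · rw [if_pos hc]
              · rw [if_neg (by simp [hc]), PySem.Dict.contains_insert]
                simp [hjK]
            have hocc'' : (if occ.contains (K : Int) then occ
                else occ.insert (K : Int) pos).get? j = occ.get? j := by
              by_cases hc : occ.contains (K : Int) = true
              · rw [if_pos hc]
              · rw [if_neg (by simp [hc]), PySem.Dict.get?_insert]
                simp [hjK]
            rw [hocc', hocc'']
            by_cases hP : pvReachP K j.toNat rest
            · have hb : pvReach K j.toNat rest = true := (pvReach_iff _ _ _).mpr hP
              have hpre : pvRep j.toNat <+: ch :: rest :=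
                (pvRep_prefix_cons hj1' hch hch0).mpr (Or.inr (by rw [hK] at hP; exact hP))
              by_cases hc : occ.contains j = false
              · rw [if_pos ⟨hb, hc⟩, if_pos ⟨hpre, hc⟩]
              · rw [if_neg (fun h => hc h.2), if_neg (fun h => hc h.2)]
            · have hb : pvReach K j.toNat rest = false := pvReach_false_of_not hP
              have hpre : ¬ (pvRep j.toNat <+: ch :: rest) := by
                intro hq
                rcases (pvRep_prefix_cons hj1' hch hch0).mp hq with h1 | h2
                · rw [← hK] at h1; omega
                · rw [← hK] at h2; exact hP h2
              rw [if_neg (fun h => by rw [hb] at h; exact absurd h.1 (by simp)),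
                if_neg (fun h => hpre h.1)]
    · have hch' : PySem.Chars.isdigit ch = false := by simp at hch; exact hch
      simp only [pvScanDigits, hch', Bool.false_eq_true, if_false]
      rw [if_neg]
      rintro ⟨hr, -⟩
      rcases List.exists_cons_of_ne_nil (pvRep_ne_nil j.toNat) with ⟨c1, u, hu⟩
      have hc1 : c1 = ch := by
        rcases hr with ⟨t', ht'⟩
        rw [hu] at ht'
        exact (List.cons.inj ht').1
      have hdig : PySem.Chars.isdigit c1 = true :=
        pvRep_digits j.toNat c1 (by rw [hu]; simp)
      rw [hc1, hch'] at hdig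
      exact absurd hdig (by simp)

-- ---- first hit up to a bound ----
def pvFH (s : List Char) (c : Nat) (m : Nat) : Option Int :=
  ((List.range c).find? (fun p => pvHit s p m)).map (fun p => (p : Int))

lemma pvFH_succ (s : List Char) (c : Nat) (m : Nat) :
    pvFH s (c + 1) m =
      match pvFH s c m with
      | some q => some q
      | none => if pvHit s c m then some (c : Int) else none := by
  cases hfind : (List.range c).find? (fun p => pvHit s p m) with
  | some q =>
    have h1 : pvFH s c m = some (q : Int) := by simp [pvFH, hfind]
    rw [h1]
    simp [pvFH, List.range_succ, List.find?_append, hfind]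
  | none =>
    have h1 : pvFH s c m = none := by simp [pvFH, hfind]
    rw [h1]
    by_cases hh : pvHit s c m = true <;>
      simp [pvFH, List.range_succ, List.find?_append, hfind, hh]

lemma pvFH_ext (s : List Char) (m : Nat) : ∀ (c c' : Nat), c ≤ c' →
    (∀ p, c ≤ p → p < c' → pvHit s p m = false) → pvFH s c' m = pvFH s c m := by
  intro c c' hle hno
  induction c' with
  | zero =>
    have h0 : c = 0 := by omega
    subst h0; rfl
  | succ c' ih =>
    by_cases hcc : c ≤ c'
    · rw [pvFH_succ, ih hcc (fun p hp1 hp2 => hno p hp1 (by omega))]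
      cases hx : pvFH s c m <;> simp [hno c' hcc (by omega)]
    · have h0 : c = c' + 1 := by omega
      subst h0; rfl

lemma pvFH_mono (s : List Char) (m : Nat) {c : Nat} {x : Int} (h : pvFH s c m = some x) :
    ∀ c', c ≤ c' → pvFH s c' m = some x := by
  intro c' hcc
  induction c' with
  | zero =>
    have h0 : c = 0 := by omega
    rw [← h0]; exact h
  | succ c' ih =>
    by_cases hcc' : c ≤ c'
    · rw [pvFH_succ, ih hcc']
    · have h0 : c = c' + 1 := by omega
      rw [← h0]; exact h

lemma pvPatt_ne_nil (m : Nat) : pvPatt m ≠ [] := by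
  simp [pvPatt]

lemma pvFH_full (s : List Char) (m : Nat) :
    pvFH s s.length m =
      (if PySem.Chars.find s (pvPatt m) = -1 then none
       else some (PySem.Chars.find s (pvPatt m))) := by
  by_cases hf : PySem.Chars.find s (pvPatt m) = -1
  · rw [if_pos hf]
    have hno : ∀ p, pvHit s p m = false := by
      intro p
      simp only [pvHit, decide_eq_false_iff_not]
      intro hpre
      have hex : ∃ jj, pvPatt m <+: s.drop jj := ⟨p, hpre⟩
      rw [PySem.Chars.exists_prefix_drop_iff_isIn, PySem.Chars.isIn_iff_infix] at hex
      exact (PySem.Chars.find_eq_neg_one_iff s (pvPatt m)).mp hf hex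
    simp only [pvFH]
    rw [List.find?_eq_none.mpr (fun x hx => by simp [hno x])]
    rfl
  · rw [if_neg hf]
    have h0 : 0 ≤ PySem.Chars.find s (pvPatt m) :=
      (PySem.Chars.find_nonneg_iff s (pvPatt m)).mpr
        ((PySem.Chars.find_ne_neg_one_iff s (pvPatt m)).mp hf)
    obtain ⟨hpre, hmin⟩ := PySem.Chars.find_spec h0
    set q : Nat := (PySem.Chars.find s (pvPatt m)).toNat with hq
    have hqlt : q < s.length := by
      by_contra hge
      rw [List.drop_eq_nil_of_le (by omega)] at hpre
      exact pvPatt_ne_nil m (List.prefix_nil.mp hpre)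
    have h1 : pvFH s q m = none := by
      have he := pvFH_ext s m 0 q (by omega) (fun p hp1 hp2 => by
        simp only [pvHit, decide_eq_false_iff_not]
        exact hmin p (by omega))
      rw [he]; rfl
    have h2 : pvFH s (q + 1) m = some (q : Int) := by
      rw [pvFH_succ, h1]
      simp [pvHit, hpre]
    have h3 := pvFH_mono s m h2 s.length (by omega)
    rw [h3]
    congr 1
    omega

lemma pvScanOccs_get (s : List Char) (limit : Int) (j : Int) (hj1 : 1 ≤ j) (hj2 : j ≤ limit) :
    ∀ (n : Nat) (c : Nat) (occ : PySem.Dict Int Int), s.length - c = n → c ≤ s.length →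
    occ.get? j = pvFH s c j.toNat →
    (pvScanOccs s limit c occ).get? j = pvFH s s.length j.toNat := by
  intro n
  induction n using Nat.strong_induction_on with
  | _ n ih =>
    intro c occ hn hc hocc
    rw [pvScanOccs]
    split_ifs with h
    · rw [hocc]
      have hnb : ¬ ("BLOCO ".toList <:+: s.drop c) :=
        (PySem.Chars.findFrom_natCast_eq_neg_one_iff s _ c hc).mp h
      have hno : ∀ p, c ≤ p → p < s.length → pvHit s p j.toNat = false := by
        intro p hp1 hp2
        apply pvNoHit
        intro hpre
        apply hnb
        rw [← PySem.Chars.isIn_iff_infix, ← PySem.Chars.exists_prefix_drop_iff_isIn]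
        refine ⟨p - c, ?_⟩
        rw [List.drop_drop, show c + (p - c) = p by omega]
        exact hpre
      exact (pvFH_ext s j.toNat c s.length hc hno).symm
    · obtain ⟨hb1, hb2⟩ := pvFindFrom_bounds s "BLOCO ".toList c (by decide) h
      obtain ⟨hge, hpre, hmin⟩ := PySem.Chars.findFrom_natCast_spec s "BLOCO ".toList c hc h
      set pos : Int := PySem.Chars.findFrom s "BLOCO ".toList (c : Int) none with hposdef
      set p : Nat := pos.toNat with hp
      apply ih (s.length - (p + 1)) (by omega) (p + 1) _ rfl (by omega)
      rw [pvScanDigits_zero_get _ limit _ _ j hj1 hj2]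
      have hFHp : pvFH s p j.toNat = pvFH s c j.toNat :=
        pvFH_ext s j.toNat c p (by omega)
          (fun r hr1 hr2 => pvNoHit (fun hq => hmin r hr1 (by omega) hq) _)
      rw [pvFH_succ]
      cases hx : pvFH s c j.toNat with
      | some qq =>
        have hcont : occ.contains j = true := by
          rw [PySem.Dict.contains_eq_isSome_get?, hocc, hx]; rfl
        rw [if_neg (fun hh => by rw [hcont] at hh; exact absurd hh.2 (by simp)),
          hocc, hx, hFHp, hx]
      | none =>
        have hcont : occ.contains j = false := by
          rw [PySem.Dict.contains_eq_isSome_get?, hocc, hx]; rfl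
        rw [hFHp, hx]
        by_cases hd : pvRep j.toNat <+: s.drop (p + 6)
        · rw [if_pos ⟨hd, hcont⟩]
          have hhit : pvHit s p j.toNat = true := (pvHit_iff hpre _).mpr hd
          simp only [hhit, if_true]
          congr 1
          omega
        · rw [if_neg (fun hh => hd hh.1), hocc, hx]
          have hhit : pvHit s p j.toNat = false := by
            rw [← Bool.not_eq_true, pvHit_iff hpre]
            exact hd
          simp [hhit]

lemma pvMaster (s : List Char) (limit : Int) (j : Int) (hj1 : 1 ≤ j) (hj2 : j ≤ limit) :
    (pvScanOccs s limit 0 PySem.Dict.empty).get? j =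
      (if PySem.Chars.find s (pvPatt j.toNat) = -1 then none
       else some (PySem.Chars.find s (pvPatt j.toNat))) := by
  rw [← pvFH_full]
  apply pvScanOccs_get s limit j hj1 hj2 s.length 0 PySem.Dict.empty (by omega) (by omega)
  simp [pvFH, PySem.Dict.get?_empty]

lemma pvGetD_eq (a : String) (limit j d : Int) (hj1 : 1 ≤ j) (hj2 : j ≤ limit) :
    (pvScanOccs a.toList limit 0 PySem.Dict.empty).getD j d =
      (if PySem.Chars.find a.toList (pvPatt j.toNat) = -1 then d
       else PySem.Chars.find a.toList (pvPatt j.toNat)) := by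
  rw [PySem.Dict.getD_eq_get?_getD, pvMaster a.toList limit j hj1 hj2]
  by_cases hf : PySem.Chars.find a.toList (pvPatt j.toNat) = -1 <;> simp [hf]

-- ===== VERDICT (by name: the statement is the Claim_ definition above) =====
theorem findRanges_spec : Claim_equal_findRanges := by
  intro a length offset _
  unfold Spec_findRanges findRanges findRanges_alt
  have hfold :
      (PySem.List.pyRange 1 (1 + length)).foldl (fun r i =>
        r.insert (offset + i) [PySem.Str.find a (pvFmt i),
          if PySem.Str.find a (pvFmt (i + 1)) = -1 then PySem.Str.len a
          else PySem.Str.find a (pvFmt (i + 1))]) PySem.Dict.empty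
      = (PySem.List.pyRange 1 (1 + length)).foldl (fun r i =>
        r.insert (offset + i)
          [(pvScanOccs a.toList (length + 1) 0 PySem.Dict.empty).getD i (-1),
           (pvScanOccs a.toList (length + 1) 0 PySem.Dict.empty).getD (i + 1)
             (PySem.Str.len a)]) PySem.Dict.empty := by
    apply PySem.List.foldl_congr_mem
    intro acc i hi
    obtain ⟨hi1, hi2⟩ := PySem.List.mem_pyRange_one.mp hi
    have hstart :
        PySem.Str.find a (pvFmt i)
          = (pvScanOccs a.toList (length + 1) 0 PySem.Dict.empty).getD i (-1) := by
      rw [pvGetD_eq a (length + 1) i (-1) hi1 (by omega),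
        PySem.Str.find_eq, pvFmt_toList (by omega)]
      by_cases hf : PySem.Chars.find a.toList (pvPatt i.toNat) = -1 <;> simp [hf]
    have hend :
        (if PySem.Str.find a (pvFmt (i + 1)) = -1 then PySem.Str.len a
         else PySem.Str.find a (pvFmt (i + 1)))
          = (pvScanOccs a.toList (length + 1) 0 PySem.Dict.empty).getD (i + 1)
              (PySem.Str.len a) := by
      rw [pvGetD_eq a (length + 1) (i + 1) (PySem.Str.len a) (by omega) (by omega),
        PySem.Str.find_eq, pvFmt_toList (by omega)]
    rw [hstart, hend]
  rw [hfold]
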